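-- pv_equiv track=rewrite | github.com/mostafa-3bdelaal/SmartCarPark | main.py | sortPosListColumns
-- ===== SOURCE A (Python) =====
-- def sortPosListColumns(posList, colTolerance=20):
--     """
--     Sort parking spots vertically first:
--     - First column from top to bottom
--     - Then second column, etc.
--     colTolerance: allows small deviation in X for spots in the same column
--     """
--
--     # Sort initially by X (columns)
--     posListSorted = sorted(posList, key=lambda x: x[0])
--     cols = []
--
--     for pos in posListSorted:
--         placed = False
--         for col in cols:
--             if abs(pos[0] - col[0][0]) < colTolerance:
--                 col.append(pos)
--                 placed = True
--                 break
--
--         if not placed: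
--             cols.append([pos])
--
--     # Sort each column by Y (top to bottom) and merge all columns
--     finalList = []
--     for col in cols:
--         colSorted = sorted(col, key=lambda x: x[1])
--         finalList.extend(colSorted)
--
--     return finalList
-- ===== SOURCE B (Python) =====
-- def sortPosListColumns(posList, colTolerance=20):
--     """
--     Single linear sweep over the X-sorted list: since columns are created in
--     increasing-X order, a point can only belong to the most recent column, so
--     start a new column whenever the gap to the current column's anchor X
--     reaches colTolerance, flushing each finished column sorted by Y.
--     """
--     xs = sorted(posList, key=lambda p: p[0])
--     result = []
--     group = []
--     for p in xs:
--         if group and p[0] - group[0][0] < colTolerance: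
--             group.append(p)
--         else:
--             if group:
--                 result.extend(sorted(group, key=lambda q: q[1]))
--             group = [p]
--     if group:
--         result.extend(sorted(group, key=lambda q: q[1]))
--     return result
-- ===== Notes on version B (the rewrite author's own statement) =====
-- stated objective: faster
-- what changed: Replaced the quadratic inner scan over all existing columns by a single linear sweep over the X-sorted list: since column anchors are created in increasing X order, a point can only join the most recent column, so each finished column is flushed (sorted by Y) as soon as the anchor gap reaches colTolerance.
import Mathlib
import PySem

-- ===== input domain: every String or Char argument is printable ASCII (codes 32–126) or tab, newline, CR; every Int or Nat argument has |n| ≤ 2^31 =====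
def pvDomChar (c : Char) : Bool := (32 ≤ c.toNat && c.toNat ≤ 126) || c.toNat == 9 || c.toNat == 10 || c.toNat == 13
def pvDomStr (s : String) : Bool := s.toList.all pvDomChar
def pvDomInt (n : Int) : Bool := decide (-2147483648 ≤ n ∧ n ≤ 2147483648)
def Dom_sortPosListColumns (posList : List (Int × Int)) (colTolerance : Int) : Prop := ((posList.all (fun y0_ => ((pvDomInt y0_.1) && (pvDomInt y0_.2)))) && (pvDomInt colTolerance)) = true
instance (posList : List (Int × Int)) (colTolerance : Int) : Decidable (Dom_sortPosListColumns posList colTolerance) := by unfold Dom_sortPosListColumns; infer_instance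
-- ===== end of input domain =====

-- ===== PORT A =====
-- B changes: one linear sweep over the X-sorted list instead of scanning all existing
-- columns for each point (objective: faster; the grouping result is provably the same).

-- anchor X of a column; columns built by A are always nonempty, so headD is exact for col[0][0]
def pvAnch (col : List (Int × Int)) : Int := (col.headD (0, 0)).1

def pvSortY (col : List (Int × Int)) : List (Int × Int) :=
  PySem.List.sorted col (fun q => q.2) false

-- inner 'for col in cols' loop of A: append pos to the first column within tolerance,
-- else (loop falls through, placed stays False) open a new column at the end
def pvPlaceA (tol : Int) (cols : List (List (Int × Int))) (pos : Int × Int) :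
    List (List (Int × Int)) :=
  match cols with
  | [] => [[pos]]
  | col :: rest =>
    if |pos.1 - pvAnch col| < tol then (col ++ [pos]) :: rest
    else col :: pvPlaceA tol rest pos

def sortPosListColumns (posList : List (Int × Int)) (colTolerance : Int) : List (Int × Int) :=
  let posListSorted := PySem.List.sorted posList (fun x => x.1) false
  let cols := posListSorted.foldl (pvPlaceA colTolerance) []
  cols.foldl (fun acc col => acc ++ pvSortY col) []

-- ===== PORT B =====
-- loop body of Source B over state (result, group)
def pvStepB (tol : Int) (st : List (Int × Int) × List (Int × Int)) (p : Int × Int) :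
    List (Int × Int) × List (Int × Int) :=
  match st with
  | (res, group) =>
    match group with
    | [] => (res, [p])
    | g0 :: gt =>
      if p.1 - g0.1 < tol then (res, (g0 :: gt) ++ [p])
      else (res ++ pvSortY (g0 :: gt), [p])

def sortPosListColumns_alt (posList : List (Int × Int)) (colTolerance : Int) : List (Int × Int) :=
  let xs := PySem.List.sorted posList (fun p => p.1) false
  let st := xs.foldl (pvStepB colTolerance) ([], [])
  match st.2 with
  | [] => st.1
  | _ :: _ => st.1 ++ pvSortY st.2

-- ===== PRECONDITION & SPEC =====
def Spec_sortPosListColumns (posList : List (Int × Int)) (colTolerance : Int) (out : List (Int × Int)) : Prop := out = sortPosListColumns_alt posList colTolerance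
instance (posList : List (Int × Int)) (colTolerance : Int) (out : List (Int × Int)) : Decidable (Spec_sortPosListColumns posList colTolerance out) := by unfold Spec_sortPosListColumns; infer_instance

-- ===== CLAIM (what is proved, stated in full; the proofs are below) =====
def Claim_equal_sortPosListColumns : Prop := ∀ (posList : List (Int × Int)) (colTolerance : Int), Dom_sortPosListColumns posList colTolerance → Spec_sortPosListColumns posList colTolerance (sortPosListColumns posList colTolerance)

-- ===== LEMMAS AND PROOFS =====

-- A's per-column output loop is concatenation of the Y-sorted columns
lemma pvFinalA_eq_flatMap (cols : List (List (Int × Int))) :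
    cols.foldl (fun acc col => acc ++ pvSortY col) [] = cols.flatMap pvSortY := by
  exact (List.flatMap_eq_foldl (f := pvSortY) (l := cols)).symm

-- B's result accumulator only grows by appending
lemma pvFoldB_res (tol : Int) (xs : List (Int × Int)) :
    ∀ (r g : List (Int × Int)),
      xs.foldl (pvStepB tol) (r, g)
        = (r ++ (xs.foldl (pvStepB tol) ([], g)).1, (xs.foldl (pvStepB tol) ([], g)).2) := by
  induction xs with
  | nil => intro r g; simp
  | cons x xs ih =>
    intro r g
    match g with
    | [] => simp only [List.foldl_cons, pvStepB]; exact ih r [x]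
    | g0 :: gt =>
      simp only [List.foldl_cons, pvStepB]
      split
      · exact ih r ((g0 :: gt) ++ [x])
      · simp only [List.nil_append]
        rw [ih (r ++ pvSortY (g0 :: gt)) [x], ih (pvSortY (g0 :: gt)) [x]]
        simp

-- the group component never becomes empty once nonempty
lemma pvFoldB_group_ne (tol : Int) (xs : List (Int × Int)) :
    ∀ (st : List (Int × Int) × List (Int × Int)), st.2 ≠ [] →
      (xs.foldl (pvStepB tol) st).2 ≠ [] := by
  induction xs with
  | nil => intro st h; simpa using h
  | cons x xs ih =>
    intro st h
    match st with
    | (r, []) => exact absurd rfl h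
    | (r, g0 :: gt) =>
      simp only [List.foldl_cons, pvStepB]
      split <;> exact ih _ (by simp)

-- columns left of the last never match a new point whose X is ≥ tol past their anchors
lemma pvPlaceA_skip (tol : Int) (x : Int × Int) :
    ∀ (done cols : List (List (Int × Int))),
      (∀ c ∈ done, ¬ |x.1 - pvAnch c| < tol) →
      pvPlaceA tol (done ++ cols) x = done ++ pvPlaceA tol cols x := by
  intro done
  induction done with
  | nil => intro cols _; simp
  | cons c cs ih =>
    intro cols h
    simp only [List.cons_append, pvPlaceA]
    rw [if_neg (h c (by simp)), ih cols (fun d hd => h d (by simp [hd]))]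

lemma pvAnch_append (g : List (Int × Int)) (x : Int × Int) (hg : g ≠ []) :
    pvAnch (g ++ [x]) = pvAnch g := by
  match g with
  | [] => exact absurd rfl hg
  | g0 :: gt => rfl

-- MAIN INVARIANT: processing the X-sorted tail, A's many-column state (done ++ [g])
-- produces the same merged output as B's (flushed, current-group) state
lemma pvMain (tol : Int) (xs : List (Int × Int)) :
    ∀ (done : List (List (Int × Int))) (g : List (Int × Int)),
      g ≠ [] →
      List.Pairwise (fun p q : Int × Int => p.1 ≤ q.1) xs →
      (∀ x ∈ xs, ∀ c ∈ done, tol ≤ x.1 - pvAnch c) →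
      (∀ x ∈ xs, pvAnch g ≤ x.1) →
      (xs.foldl (pvPlaceA tol) (done ++ [g])).flatMap pvSortY
        = done.flatMap pvSortY
          ++ (xs.foldl (pvStepB tol) ([], g)).1
          ++ pvSortY (xs.foldl (pvStepB tol) ([], g)).2 := by
  induction xs with
  | nil => intro done g hg _ _ _; simp
  | cons x xs ih =>
    intro done g hg hsort hdone hganch
    have hskip : ∀ c ∈ done, ¬ |x.1 - pvAnch c| < tol := by
      intro c hc
      have h1 := hdone x (by simp) c hc
      have h2 : (x.1 - pvAnch c) ≤ |x.1 - pvAnch c| := le_abs_self _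
      omega
    have habs : |x.1 - pvAnch g| = x.1 - pvAnch g := by
      have := hganch x (by simp); exact abs_of_nonneg (by omega)
    have hsA : pvPlaceA tol (done ++ [g]) x = done ++ pvPlaceA tol [g] x :=
      pvPlaceA_skip tol x done [g] hskip
    obtain ⟨g0, gt, rfl⟩ : ∃ g0 gt, g = g0 :: gt := by
      cases g with
      | nil => exact absurd rfl hg
      | cons a b => exact ⟨a, b, rfl⟩
    have habs' : |x.1 - g0.1| = x.1 - g0.1 := habs
    simp only [List.foldl_cons, hsA]
    by_cases hlt : x.1 - g0.1 < tol
    · -- x joins the current column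
      have hA : pvPlaceA tol [g0 :: gt] x = [(g0 :: gt) ++ [x]] := by
        simp [pvPlaceA, pvAnch, habs', hlt]
      have hB : pvStepB tol ([], g0 :: gt) x = ([], (g0 :: gt) ++ [x]) := by
        simp [pvStepB, hlt]
      rw [hA, hB]
      exact ih done ((g0 :: gt) ++ [x]) (by simp) hsort.tail
        (fun q hq c hc => hdone q (by simp [hq]) c hc)
        (fun q hq => by
          rw [pvAnch_append _ _ (by simp)]
          exact hganch q (by simp [hq]))
    · -- the current column is finished; x starts a new one
      have hA : pvPlaceA tol [g0 :: gt] x = [g0 :: gt, [x]] := by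
        simp [pvPlaceA, pvAnch, habs', hlt]
      have hB : pvStepB tol ([], g0 :: gt) x = (pvSortY (g0 :: gt), [x]) := by
        simp [pvStepB, hlt]
      rw [hA, hB]
      have hx_le : ∀ q ∈ xs, x.1 ≤ q.1 := by
        intro q hq; exact List.rel_of_pairwise_cons hsort hq
      have := ih (done ++ [g0 :: gt]) [x] (by simp) hsort.tail
        (fun q hq c hc => by
          rcases List.mem_append.1 hc with hc | hc
          · exact hdone q (by simp [hq]) c hc
          · have hc' : c = g0 :: gt := by simpa using hc
            subst hc'
            have h1 := hx_le q hq
            have h2 : pvAnch (g0 :: gt) = g0.1 := rfl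
            omega)
        (fun q hq => by simpa [pvAnch] using hx_le q hq)
      rw [show done ++ [g0 :: gt, [x]] = (done ++ [g0 :: gt]) ++ [[x]] by simp] at *
      rw [this, pvFoldB_res tol xs (pvSortY (g0 :: gt)) [x]]
      simp

-- ===== VERDICT (by name: the statement is the Claim_ definition above) =====
theorem sortPosListColumns_spec : Claim_equal_sortPosListColumns := by
  intro posList tol _
  show sortPosListColumns posList tol = sortPosListColumns_alt posList tol
  unfold sortPosListColumns sortPosListColumns_alt
  have hpair := PySem.List.sorted_pairwise posList (fun p : Int × Int => p.1)
  cases hs : PySem.List.sorted posList (fun p : Int × Int => p.1) false with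
  | nil => simp
  | cons p ps =>
    rw [hs] at hpair
    simp only [List.foldl_cons]
    have h1 : pvPlaceA tol [] p = [] ++ [[p]] := rfl
    have h2 : pvStepB tol ([], []) p = ([], [p]) := rfl
    rw [h1, h2, pvFinalA_eq_flatMap]
    have hmain := pvMain tol ps [] [p] (by simp) hpair.tail
      (by simp)
      (fun q hq => by
        simpa [pvAnch] using List.rel_of_pairwise_cons hpair hq)
    rw [hmain]
    have hne := pvFoldB_group_ne tol ps (([] : List (Int × Int)), [p]) (by simp)
    cases hg : (ps.foldl (pvStepB tol) ([], [p])).2 with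
    | nil => exact absurd hg hne
    | cons a b => simp
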